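-- pv_equiv track=rewrite | github.com/Workwrite-Niidome/voynich-manuscript-analysis | archive/scripts/constructed_notation_test.py | segment_word
-- ===== SOURCE A (Python) =====
-- PREFIXES = [
--     'qok', 'qot', 'cph', 'cfh', 'cth', 'ckh',
--     'ot', 'ok', 'op', 'ol',
--     'qo', 'sh', 'ch', 'ck', 'ct',
--     'd', 'k', 'p', 'q', 's', 't', 'y', 'o', 'f',
-- ]
--
-- SUFFIXES = [
--     'aiin', 'aiir', 'aiim', 'aiil', 'aiis',
--     'ain', 'air', 'aim', 'ail',
--     'iin', 'iir', 'iim',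
--     'eey', 'ees', 'eeg',
--     'edy', 'ely', 'ory', 'ary', 'ody',
--     'am', 'an', 'ar', 'al',
--     'dy', 'ty', 'sy', 'ky', 'ry', 'ly', 'my',
--     'ol', 'or', 'om', 'os',
--     'ey', 'ay',
--     'y', 'n', 'l', 'r', 'm', 's', 'o',
-- ]
--
-- def segment_word(word):
--     """Attempt to segment a Voynich word into prefix + root + suffix."""
--     if len(word) < 2:
--         return (None, word, None)
--
--     prefix = None
--     suffix = None
--     remainder = word
--
--     # Try prefixes
--     for p in PREFIXES:
--         if remainder.startswith(p) and len(remainder) > len(p):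
--             prefix = p
--             remainder = remainder[len(p):]
--             break
--
--     # Try suffixes
--     for s in SUFFIXES:
--         if remainder.endswith(s) and len(remainder) > len(s):
--             suffix = s
--             remainder = remainder[:-len(s)]
--             break
--
--     # If remainder is empty after stripping, treat whole word as root
--     if not remainder:
--         return (None, word, None)
--
--     return (prefix, remainder, suffix)
-- ===== SOURCE B (Python) =====
-- # Branchy longest-match segmentation: instead of looping over the pattern lists with
-- # startswith/endswith, test the one slice of each candidate length (descending) for
-- # membership in a hash set; exact because the lists are ordered by non-increasing
-- # length, so first match equals longest match.
-- PREFIX_SET = set('qok qot cph cfh cth ckh ot ok op ol qo sh ch ck ct '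
--                  'd k p q s t y o f'.split())
--
-- SUFFIX_SET = set('aiin aiir aiim aiil aiis ain air aim ail iin iir iim '
--                  'eey ees eeg edy ely ory ary ody am an ar al '
--                  'dy ty sy ky ry ly my ol or om os ey ay '
--                  'y n l r m s o'.split())
--
-- def segment_word(word):
--     """Attempt to segment a Voynich word into prefix + root + suffix."""
--     if len(word) < 2:
--         return (None, word, None)
--
--     prefix = None
--     if len(word) > 3 and word[:3] in PREFIX_SET:
--         prefix, word_rest = word[:3], word[3:]
--     elif len(word) > 2 and word[:2] in PREFIX_SET:
--         prefix, word_rest = word[:2], word[2:]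
--     elif len(word) > 1 and word[:1] in PREFIX_SET:
--         prefix, word_rest = word[:1], word[1:]
--     else:
--         word_rest = word
--
--     suffix = None
--     n = len(word_rest)
--     if n > 4 and word_rest[-4:] in SUFFIX_SET:
--         suffix, word_rest = word_rest[-4:], word_rest[:-4]
--     elif n > 3 and word_rest[-3:] in SUFFIX_SET:
--         suffix, word_rest = word_rest[-3:], word_rest[:-3]
--     elif n > 2 and word_rest[-2:] in SUFFIX_SET:
--         suffix, word_rest = word_rest[-2:], word_rest[:-2]
--     elif n > 1 and word_rest[-1:] in SUFFIX_SET: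
--         suffix, word_rest = word_rest[-1:], word_rest[:-1]
--
--     return (prefix, word_rest, suffix)
-- ===== Notes on version B (the rewrite author's own statement) =====
-- stated objective: alternative
-- what changed: Instead of scanning the 24-prefix and 42-suffix lists with startswith/endswith until the first hit, B tests the single slice of each candidate length in descending order (3,2,1 / 4,3,2,1) for membership in a hash set via a flat if/elif chain with no loops; exact because the lists are ordered by non-increasing length, so first match equals longest match.
import Mathlib
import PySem

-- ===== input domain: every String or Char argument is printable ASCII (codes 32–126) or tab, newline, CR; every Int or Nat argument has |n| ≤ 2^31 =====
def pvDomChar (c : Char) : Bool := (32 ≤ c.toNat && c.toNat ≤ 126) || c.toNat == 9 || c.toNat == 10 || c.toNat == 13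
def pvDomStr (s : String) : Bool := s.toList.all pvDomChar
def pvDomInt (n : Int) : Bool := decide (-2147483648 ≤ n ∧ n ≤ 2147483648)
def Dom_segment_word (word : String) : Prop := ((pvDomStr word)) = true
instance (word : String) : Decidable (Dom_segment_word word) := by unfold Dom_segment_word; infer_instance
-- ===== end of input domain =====

-- B replaces A's linear scan of the prefix/suffix pattern lists by a loop-free if/elif
-- chain testing the one slice of each candidate length (descending) against a hash set
-- (the lists are ordered by non-increasing length, so first match = longest match);
-- objective: alternative algorithm, same exact result.

-- ===== PORT A =====
def pvPrefixes : List (List Char) :=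
  ["qok".toList, "qot".toList, "cph".toList, "cfh".toList, "cth".toList, "ckh".toList,
   "ot".toList, "ok".toList, "op".toList, "ol".toList,
   "qo".toList, "sh".toList, "ch".toList, "ck".toList, "ct".toList,
   "d".toList, "k".toList, "p".toList, "q".toList, "s".toList, "t".toList, "y".toList,
   "o".toList, "f".toList]

def pvSuffixes : List (List Char) :=
  ["aiin".toList, "aiir".toList, "aiim".toList, "aiil".toList, "aiis".toList,
   "ain".toList, "air".toList, "aim".toList, "ail".toList,
   "iin".toList, "iir".toList, "iim".toList,
   "eey".toList, "ees".toList, "eeg".toList,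
   "edy".toList, "ely".toList, "ory".toList, "ary".toList, "ody".toList,
   "am".toList, "an".toList, "ar".toList, "al".toList,
   "dy".toList, "ty".toList, "sy".toList, "ky".toList, "ry".toList, "ly".toList, "my".toList,
   "ol".toList, "or".toList, "om".toList, "os".toList,
   "ey".toList, "ay".toList,
   "y".toList, "n".toList, "l".toList, "r".toList, "m".toList, "s".toList, "o".toList]

-- A's prefix loop: first p with remainder.startswith(p) and len(remainder) > len(p);
-- remainder[len(p):] is r.drop p.length (PySem.List.slice_from_natCast).
def pvTryPreA (pats : List (List Char)) (r : List Char) : Option (List Char) × List Char :=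
  match pats with
  | [] => (none, r)
  | p :: ps =>
    if PySem.Chars.startswith r p ∧ r.length > p.length
    then (some p, r.drop p.length)
    else pvTryPreA ps r

-- A's suffix loop: remainder[:-len(s)] is r.take (r.length - s.length) (PySem.List.slice_to_neg_natCast).
def pvTrySufA (pats : List (List Char)) (r : List Char) : Option (List Char) × List Char :=
  match pats with
  | [] => (none, r)
  | s :: ss =>
    if PySem.Chars.endswith r s ∧ r.length > s.length
    then (some s, r.take (r.length - s.length))
    else pvTrySufA ss r

def segment_word (word : String) : Option String × String × Option String :=
  let w := word.toList
  if w.length < 2 then (none, word, none)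
  else
    let pr := pvTryPreA pvPrefixes w
    let sr := pvTrySufA pvSuffixes pr.2
    if sr.2 = [] then (none, word, none)
    else (pr.1.map String.ofList, String.ofList sr.2, sr.1.map String.ofList)

-- ===== PORT B =====
-- set('… …'.split()), elements as List Char
def pvPrefixSet : PySem.Set (List Char) :=
  PySem.Set.ofList
    ((PySem.Str.split₀ "qok qot cph cfh cth ckh ot ok op ol qo sh ch ck ct d k p q s t y o f").map
      String.toList)

def pvSuffixSet : PySem.Set (List Char) :=
  PySem.Set.ofList
    ((PySem.Str.split₀ ("aiin aiir aiim aiil aiis ain air aim ail iin iir iim eey ees eeg edy ely ory ary ody am an ar al dy ty sy ky ry ly my ol or om os ey ay y n l r m s o")).map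
      String.toList)

-- B's if/elif chain, loop-free: word[:L] is w.take L, word[L:] is w.drop L,
-- rest[-L:] is r.drop (r.length - L), rest[:-L] is r.take (r.length - L).
def segment_word_alt (word : String) : Option String × String × Option String :=
  let w := word.toList
  if w.length < 2 then (none, word, none)
  else
    let (prefix?, rest) :=
      if 3 < w.length ∧ w.take 3 ∈ pvPrefixSet then (some (w.take 3), w.drop 3)
      else if 2 < w.length ∧ w.take 2 ∈ pvPrefixSet then (some (w.take 2), w.drop 2)
      else if 1 < w.length ∧ w.take 1 ∈ pvPrefixSet then (some (w.take 1), w.drop 1)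
      else (none, w)
    let n := rest.length
    let (suffix?, root) :=
      if 4 < n ∧ rest.drop (n - 4) ∈ pvSuffixSet then (some (rest.drop (n - 4)), rest.take (n - 4))
      else if 3 < n ∧ rest.drop (n - 3) ∈ pvSuffixSet then (some (rest.drop (n - 3)), rest.take (n - 3))
      else if 2 < n ∧ rest.drop (n - 2) ∈ pvSuffixSet then (some (rest.drop (n - 2)), rest.take (n - 2))
      else if 1 < n ∧ rest.drop (n - 1) ∈ pvSuffixSet then (some (rest.drop (n - 1)), rest.take (n - 1))
      else (none, rest)
    (prefix?.map String.ofList, String.ofList root, suffix?.map String.ofList)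

-- ===== PRECONDITION & SPEC =====
def Spec_segment_word (word : String) (out : Option String × String × Option String) : Prop := out = segment_word_alt word
instance (word : String) (out : Option String × String × Option String) : Decidable (Spec_segment_word word out) := by unfold Spec_segment_word; infer_instance

-- ===== CLAIM (what is proved, stated in full; the proofs are below) =====
def Claim_equal_segment_word : Prop := ∀ (word : String), Dom_segment_word word → Spec_segment_word word (segment_word word)

-- ===== LEMMAS AND PROOFS =====

theorem pvTryPreA_append (xs ys : List (List Char)) (r : List Char) :
    pvTryPreA (xs ++ ys) r =
      if (pvTryPreA xs r).1 = none then pvTryPreA ys r else pvTryPreA xs r := by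
  induction xs with
  | nil => simp [pvTryPreA]
  | cons p ps ih =>
    simp only [List.cons_append, pvTryPreA]
    by_cases h : (PySem.Chars.startswith r p : Prop) ∧ r.length > p.length
    · simp [h]
    · simp only [if_neg h]; exact ih

theorem pvTrySufA_append (xs ys : List (List Char)) (r : List Char) :
    pvTrySufA (xs ++ ys) r =
      if (pvTrySufA xs r).1 = none then pvTrySufA ys r else pvTrySufA xs r := by
  induction xs with
  | nil => simp [pvTrySufA]
  | cons p ps ih =>
    simp only [List.cons_append, pvTrySufA]
    by_cases h : (PySem.Chars.endswith r p : Prop) ∧ r.length > p.length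
    · simp [h]
    · simp only [if_neg h]; exact ih

theorem pvTryPreA_const_len (ps : List (List Char)) (L : Nat)
    (h : ∀ p ∈ ps, p.length = L) (r : List Char) :
    pvTryPreA ps r =
      if L < r.length ∧ r.take L ∈ ps then (some (r.take L), r.drop L) else (none, r) := by
  induction ps with
  | nil => simp [pvTryPreA]
  | cons p ps ih =>
    have hp : p.length = L := h p (List.mem_cons_self ..)
    have hrest : ∀ q ∈ ps, q.length = L := fun q hq => h q (List.mem_cons_of_mem _ hq)
    simp only [pvTryPreA]
    by_cases hc : (PySem.Chars.startswith r p : Prop) ∧ r.length > p.length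
    · have hpre : p <+: r := by
        have := hc.1
        simpa [PySem.Chars.startswith, List.isPrefixOf_iff_prefix] using this
      have htake : r.take L = p := by
        have := List.prefix_iff_eq_take.mp hpre
        rw [← hp]; exact this.symm
      rw [if_pos hc, if_pos ⟨by omega, by rw [htake]; exact List.mem_cons_self ..⟩, htake]
      rw [hp]
    · rw [if_neg hc, ih hrest]
      by_cases hL : L < r.length
      · have hne : r.take L ≠ p := by
          intro he
          apply hc
          constructor
          · have : p <+: r := by rw [← he]; exact List.take_prefix L r
            simpa [PySem.Chars.startswith, List.isPrefixOf_iff_prefix] using this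
          · omega
        simp [hL, List.mem_cons, hne]
      · simp [hL]

theorem pvTrySufA_const_len (ps : List (List Char)) (L : Nat)
    (h : ∀ p ∈ ps, p.length = L) (r : List Char) :
    pvTrySufA ps r =
      if L < r.length ∧ r.drop (r.length - L) ∈ ps
      then (some (r.drop (r.length - L)), r.take (r.length - L)) else (none, r) := by
  induction ps with
  | nil => simp [pvTrySufA]
  | cons p ps ih =>
    have hp : p.length = L := h p (List.mem_cons_self ..)
    have hrest : ∀ q ∈ ps, q.length = L := fun q hq => h q (List.mem_cons_of_mem _ hq)
    simp only [pvTrySufA]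
    by_cases hc : (PySem.Chars.endswith r p : Prop) ∧ r.length > p.length
    · have hsuf : p <:+ r := by
        have := hc.1
        simpa [PySem.Chars.endswith, List.isSuffixOf_iff_suffix] using this
      have hdrop : r.drop (r.length - L) = p := by
        have := List.suffix_iff_eq_drop.mp hsuf
        rw [← hp]; exact this.symm
      rw [if_pos hc, if_pos ⟨by omega, by rw [hdrop]; exact List.mem_cons_self ..⟩, hdrop]
      rw [hp]
    · rw [if_neg hc, ih hrest]
      by_cases hL : L < r.length
      · have hne : r.drop (r.length - L) ≠ p := by
          intro he
          apply hc
          constructor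
          · have : p <:+ r := by rw [← he]; exact List.drop_suffix _ r
            simpa [PySem.Chars.endswith, List.isSuffixOf_iff_suffix] using this
          · omega
        simp [hL, List.mem_cons, hne]
      · simp [hL]

theorem pv_take_len (r : List Char) (L : Nat) (hL : L < r.length) : (r.take L).length = L := by
  simp [List.length_take]; omega

theorem pv_drop_len (r : List Char) (L : Nat) (hL : L < r.length) :
    (r.drop (r.length - L)).length = L := by
  simp [List.length_drop]; omega

-- B's sets hold exactly A's pattern lists' elements (same strings, no duplicates)
set_option maxRecDepth 4000 in
theorem pvPrefixSet_eq : pvPrefixSet = pvPrefixes := by decide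
set_option maxRecDepth 8000 in
theorem pvSuffixSet_eq : pvSuffixSet = pvSuffixes := by decide

-- the per-length groups of A's lists (proof-side helpers)
def pvP3 : List (List Char) := ["qok".toList, "qot".toList, "cph".toList, "cfh".toList, "cth".toList, "ckh".toList]
def pvP2 : List (List Char) := ["ot".toList, "ok".toList, "op".toList, "ol".toList, "qo".toList, "sh".toList, "ch".toList, "ck".toList, "ct".toList]
def pvP1 : List (List Char) := ["d".toList, "k".toList, "p".toList, "q".toList, "s".toList, "t".toList, "y".toList, "o".toList, "f".toList]
def pvS4 : List (List Char) := ["aiin".toList, "aiir".toList, "aiim".toList, "aiil".toList, "aiis".toList]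
def pvS3 : List (List Char) := ["ain".toList, "air".toList, "aim".toList, "ail".toList, "iin".toList, "iir".toList, "iim".toList, "eey".toList, "ees".toList, "eeg".toList, "edy".toList, "ely".toList, "ory".toList, "ary".toList, "ody".toList]
def pvS2 : List (List Char) := ["am".toList, "an".toList, "ar".toList, "al".toList, "dy".toList, "ty".toList, "sy".toList, "ky".toList, "ry".toList, "ly".toList, "my".toList, "ol".toList, "or".toList, "om".toList, "os".toList, "ey".toList, "ay".toList]
def pvS1 : List (List Char) := ["y".toList, "n".toList, "l".toList, "r".toList, "m".toList, "s".toList, "o".toList]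

theorem pv_mem_pre (r : List Char) (L : Nat) (g : List (List Char))
    (hg : pvPrefixes.filter (fun p => p.length == L) = g) (hL : L < r.length) :
    (r.take L ∈ pvPrefixSet) ↔ r.take L ∈ g := by
  have hx : (r.take L).length = L := pv_take_len r L hL
  rw [pvPrefixSet_eq, ← hg, List.mem_filter]
  simp [hx]

theorem pv_mem_suf (r : List Char) (L : Nat) (g : List (List Char))
    (hg : pvSuffixes.filter (fun p => p.length == L) = g) (hL : L < r.length) :
    (r.drop (r.length - L) ∈ pvSuffixSet) ↔ r.drop (r.length - L) ∈ g := by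
  have hx : (r.drop (r.length - L)).length = L := pv_drop_len r L hL
  rw [pvSuffixSet_eq, ← hg, List.mem_filter]
  simp [hx]

theorem pv_and_congr {P A B : Prop} (h : P → (A ↔ B)) : (P ∧ A) ↔ (P ∧ B) :=
  ⟨fun ⟨p, a⟩ => ⟨p, (h p).mp a⟩, fun ⟨p, b⟩ => ⟨p, (h p).mpr b⟩⟩

-- A's prefix scan equals B's 3/2/1 if-chain
theorem pv_prefix_eq (r : List Char) :
    pvTryPreA pvPrefixes r =
      (if 3 < r.length ∧ r.take 3 ∈ pvPrefixSet then (some (r.take 3), r.drop 3)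
       else if 2 < r.length ∧ r.take 2 ∈ pvPrefixSet then (some (r.take 2), r.drop 2)
       else if 1 < r.length ∧ r.take 1 ∈ pvPrefixSet then (some (r.take 1), r.drop 1)
       else (none, r)) := by
  have hsplit : pvPrefixes = pvP3 ++ (pvP2 ++ pvP1) := by decide
  have m3 : (3 < r.length ∧ r.take 3 ∈ pvPrefixSet) ↔ (3 < r.length ∧ r.take 3 ∈ pvP3) :=
    pv_and_congr (fun h => pv_mem_pre r 3 pvP3 (by decide) h)
  have m2 : (2 < r.length ∧ r.take 2 ∈ pvPrefixSet) ↔ (2 < r.length ∧ r.take 2 ∈ pvP2) :=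
    pv_and_congr (fun h => pv_mem_pre r 2 pvP2 (by decide) h)
  have m1 : (1 < r.length ∧ r.take 1 ∈ pvPrefixSet) ↔ (1 < r.length ∧ r.take 1 ∈ pvP1) :=
    pv_and_congr (fun h => pv_mem_pre r 1 pvP1 (by decide) h)
  rw [hsplit, pvTryPreA_append, pvTryPreA_append,
      pvTryPreA_const_len pvP3 3 (by decide) r,
      pvTryPreA_const_len pvP2 2 (by decide) r,
      pvTryPreA_const_len pvP1 1 (by decide) r]
  by_cases c3 : 3 < r.length ∧ r.take 3 ∈ pvP3
  · simp [c3, m3.mpr c3]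
  · have n3 : ¬(3 < r.length ∧ r.take 3 ∈ pvPrefixSet) := fun hh => c3 (m3.mp hh)
    by_cases c2 : 2 < r.length ∧ r.take 2 ∈ pvP2
    · simp [c3, n3, c2, m2.mpr c2]
    · have n2 : ¬(2 < r.length ∧ r.take 2 ∈ pvPrefixSet) := fun hh => c2 (m2.mp hh)
      by_cases c1 : 1 < r.length ∧ r.take 1 ∈ pvP1
      · simp [c3, n3, c2, n2, c1, m1.mpr c1]
      · have n1 : ¬(1 < r.length ∧ r.take 1 ∈ pvPrefixSet) := fun hh => c1 (m1.mp hh)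
        simp [c3, n3, c2, n2, c1, n1]

-- A's suffix scan equals B's 4/3/2/1 if-chain
theorem pv_suffix_eq (r : List Char) :
    pvTrySufA pvSuffixes r =
      (if 4 < r.length ∧ r.drop (r.length - 4) ∈ pvSuffixSet then (some (r.drop (r.length - 4)), r.take (r.length - 4))
       else if 3 < r.length ∧ r.drop (r.length - 3) ∈ pvSuffixSet then (some (r.drop (r.length - 3)), r.take (r.length - 3))
       else if 2 < r.length ∧ r.drop (r.length - 2) ∈ pvSuffixSet then (some (r.drop (r.length - 2)), r.take (r.length - 2))
       else if 1 < r.length ∧ r.drop (r.length - 1) ∈ pvSuffixSet then (some (r.drop (r.length - 1)), r.take (r.length - 1))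
       else (none, r)) := by
  have hsplit : pvSuffixes = pvS4 ++ (pvS3 ++ (pvS2 ++ pvS1)) := by decide
  have m4 : (4 < r.length ∧ r.drop (r.length - 4) ∈ pvSuffixSet) ↔ (4 < r.length ∧ r.drop (r.length - 4) ∈ pvS4) :=
    pv_and_congr (fun h => pv_mem_suf r 4 pvS4 (by decide) h)
  have m3 : (3 < r.length ∧ r.drop (r.length - 3) ∈ pvSuffixSet) ↔ (3 < r.length ∧ r.drop (r.length - 3) ∈ pvS3) :=
    pv_and_congr (fun h => pv_mem_suf r 3 pvS3 (by decide) h)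
  have m2 : (2 < r.length ∧ r.drop (r.length - 2) ∈ pvSuffixSet) ↔ (2 < r.length ∧ r.drop (r.length - 2) ∈ pvS2) :=
    pv_and_congr (fun h => pv_mem_suf r 2 pvS2 (by decide) h)
  have m1 : (1 < r.length ∧ r.drop (r.length - 1) ∈ pvSuffixSet) ↔ (1 < r.length ∧ r.drop (r.length - 1) ∈ pvS1) :=
    pv_and_congr (fun h => pv_mem_suf r 1 pvS1 (by decide) h)
  rw [hsplit, pvTrySufA_append, pvTrySufA_append, pvTrySufA_append,
      pvTrySufA_const_len pvS4 4 (by decide) r,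
      pvTrySufA_const_len pvS3 3 (by decide) r,
      pvTrySufA_const_len pvS2 2 (by decide) r,
      pvTrySufA_const_len pvS1 1 (by decide) r]
  by_cases c4 : 4 < r.length ∧ r.drop (r.length - 4) ∈ pvS4
  · simp [c4, m4.mpr c4]
  · have n4 : ¬(4 < r.length ∧ r.drop (r.length - 4) ∈ pvSuffixSet) := fun hh => c4 (m4.mp hh)
    by_cases c3 : 3 < r.length ∧ r.drop (r.length - 3) ∈ pvS3
    · simp [c4, n4, c3, m3.mpr c3]
    · have n3 : ¬(3 < r.length ∧ r.drop (r.length - 3) ∈ pvSuffixSet) := fun hh => c3 (m3.mp hh)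
      by_cases c2 : 2 < r.length ∧ r.drop (r.length - 2) ∈ pvS2
      · simp [c4, n4, c3, n3, c2, m2.mpr c2]
      · have n2 : ¬(2 < r.length ∧ r.drop (r.length - 2) ∈ pvSuffixSet) := fun hh => c2 (m2.mp hh)
        by_cases c1 : 1 < r.length ∧ r.drop (r.length - 1) ∈ pvS1
        · simp [c4, n4, c3, n3, c2, n2, c1, m1.mpr c1]
        · have n1 : ¬(1 < r.length ∧ r.drop (r.length - 1) ∈ pvSuffixSet) := fun hh => c1 (m1.mp hh)
          simp [c4, n4, c3, n3, c2, n2, c1, n1]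

theorem pvTryPreA_len (ps : List (List Char)) (r : List Char) (h : 1 ≤ r.length) :
    1 ≤ (pvTryPreA ps r).2.length := by
  induction ps with
  | nil => simpa [pvTryPreA]
  | cons p ps ih =>
    simp only [pvTryPreA]
    split_ifs with hc
    · simp only [List.length_drop]; omega
    · exact ih

theorem pvTrySufA_len (ps : List (List Char)) (r : List Char) (h : 1 ≤ r.length) :
    1 ≤ (pvTrySufA ps r).2.length := by
  induction ps with
  | nil => simpa [pvTrySufA]
  | cons p ps ih =>
    simp only [pvTrySufA]
    split_ifs with hc
    · simp only [List.length_take]; omega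
    · exact ih

-- ===== VERDICT (by name: the statement is the Claim_ definition above) =====
theorem segment_word_spec : Claim_equal_segment_word := by
  unfold Claim_equal_segment_word
  intro word _
  unfold Spec_segment_word
  by_cases hlen : word.toList.length < 2
  · simp only [segment_word, segment_word_alt, if_pos hlen]
  · have h1 : 1 ≤ (pvTryPreA pvPrefixes word.toList).2.length :=
      pvTryPreA_len _ _ (by omega)
    have h2 : 1 ≤ (pvTrySufA pvSuffixes (pvTryPreA pvPrefixes word.toList).2).2.length :=
      pvTrySufA_len _ _ h1
    have hne : ¬((pvTrySufA pvSuffixes (pvTryPreA pvPrefixes word.toList).2).2 = []) := by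
      intro hnil; rw [hnil] at h2; simp at h2
    simp only [segment_word, segment_word_alt, if_neg hlen, if_neg hne,
      ← pv_prefix_eq, ← pv_suffix_eq]
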